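-- pv_equiv track=rewrite | github.com/dhanasekars/Daily-Python-Practise | 2022/2022-09/27.py | consecutive_combo
-- ===== SOURCE A (Python) =====
-- def consecutive_combo(lst1, lst2):
--     flag = False
--     lst = sorted(lst1 + lst2)
--     for i in range(len(lst) - 1):
--         if lst[i + 1] - lst[i] == 1:
--             flag = True
--         else:
--             return False
--     return flag
-- ===== SOURCE B (Python) =====
-- def consecutive_combo(lst1, lst2):
--     xs = lst1 + lst2
--     n = len(xs)
--     if n < 2:
--         return False
--     s = set(xs)
--     return len(s) == n and max(s) - min(s) == n - 1
-- ===== Notes on version B (the rewrite author's own statement) =====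
-- stated objective: faster
-- what changed: Replaces sort-then-scan-adjacent-differences with a set/min/max check: the merged list is a consecutive run iff all elements are distinct and max-min equals n-1 (with n>=2, matching A's False on shorter inputs).
import Mathlib
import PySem

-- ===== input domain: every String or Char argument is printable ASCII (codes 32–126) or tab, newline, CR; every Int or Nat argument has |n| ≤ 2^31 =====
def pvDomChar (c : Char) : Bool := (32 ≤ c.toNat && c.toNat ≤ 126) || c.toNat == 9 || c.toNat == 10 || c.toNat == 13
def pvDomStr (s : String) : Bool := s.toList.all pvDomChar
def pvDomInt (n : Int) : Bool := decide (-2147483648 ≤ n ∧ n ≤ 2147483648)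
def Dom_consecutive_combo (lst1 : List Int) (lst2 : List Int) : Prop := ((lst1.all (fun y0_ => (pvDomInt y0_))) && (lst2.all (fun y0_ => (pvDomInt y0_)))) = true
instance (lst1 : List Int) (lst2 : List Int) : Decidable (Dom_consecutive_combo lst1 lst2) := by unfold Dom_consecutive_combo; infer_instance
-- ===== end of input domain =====

-- B replaces A's sort + adjacent-difference scan by a set/min/max check
-- (distinct count = n and max - min = n - 1, with n ≥ 2 as in A); return value only, no mutation.

-- ===== PORT A =====
-- the 'for i in range(len(lst)-1)' loop over the sorted list, with the running 'flag';
-- early 'return False' = the 'else false' branch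
def pvLoopA : Bool → List Int → Bool
  | _, x :: y :: rest => if y - x == 1 then pvLoopA true (y :: rest) else false
  | flag, _ => flag

def consecutive_combo (lst1 : List Int) (lst2 : List Int) : Bool :=
  pvLoopA false (PySem.List.sorted (lst1 ++ lst2) (fun x => x) false)

-- ===== PORT B =====
def consecutive_combo_alt (lst1 : List Int) (lst2 : List Int) : Bool :=
  if (lst1 ++ lst2).length < 2 then false
  else
    match PySem.List.max? (PySem.Set.ofList (lst1 ++ lst2)) (fun x => x),
          PySem.List.min? (PySem.Set.ofList (lst1 ++ lst2)) (fun x => x) with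
    | some hi, some lo =>
        (PySem.Set.len (PySem.Set.ofList (lst1 ++ lst2)) == ((lst1 ++ lst2).length : Int))
          && (hi - lo == ((lst1 ++ lst2).length : Int) - 1)
    | _, _ => false

-- ===== PRECONDITION & SPEC =====
def Spec_consecutive_combo (lst1 : List Int) (lst2 : List Int) (out : Bool) : Prop := out = consecutive_combo_alt lst1 lst2
instance (lst1 : List Int) (lst2 : List Int) (out : Bool) : Decidable (Spec_consecutive_combo lst1 lst2 out) := by unfold Spec_consecutive_combo; infer_instance

-- ===== CLAIM (what is proved, stated in full; the proofs are below) =====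
def Claim_equal_consecutive_combo : Prop := ∀ (lst1 : List Int) (lst2 : List Int), Dom_consecutive_combo lst1 lst2 → Spec_consecutive_combo lst1 lst2 (consecutive_combo lst1 lst2)

-- ===== LEMMAS AND PROOFS =====

theorem pvLoopA_cons2 (b : Bool) (x y : Int) (r : List Int) :
    pvLoopA b (x :: y :: r) = if y - x = 1 then pvLoopA true (y :: r) else false := by
  simp [pvLoopA]

-- last element of a strictly increasing list is at least head + length of tail
theorem last_ge_of_sorted_lt (x : Int) (t : List Int)
    (h : (x :: t).Pairwise (· < ·)) :
    x + (t.length : Int) ≤ (x :: t).getLast (by simp) := by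
  induction t generalizing x with
  | nil => simp
  | cons y r ih =>
    have hy : x < y := (List.pairwise_cons.mp h).1 y (by simp)
    have := ih y (List.Pairwise.of_cons h)
    rw [List.getLast_cons (by simp)]
    simp only [List.length_cons] at *
    push_cast at *
    omega

-- characterisation of A's scan on a sorted list
theorem pvLoopA_true_iff (x : Int) (t : List Int)
    (hs : (x :: t).Pairwise (· ≤ ·)) :
    pvLoopA true (x :: t) = true ↔
      (x :: t).Nodup ∧ (x :: t).getLast (by simp) = x + (t.length : Int) := by
  induction t generalizing x with
  | nil => simp [pvLoopA]
  | cons y r ih =>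
    have hxy : x ≤ y := (List.pairwise_cons.mp hs).1 y (by simp)
    have hs' : (y :: r).Pairwise (· ≤ ·) := List.Pairwise.of_cons hs
    rw [List.getLast_cons (by simp), pvLoopA_cons2]
    by_cases hd : y - x = 1
    · have hy : y = x + 1 := by omega
      have hxnot : x ∉ y :: r := by
        intro hmem
        rcases List.mem_cons.mp hmem with h1 | h2
        · omega
        · have := (List.pairwise_cons.mp hs').1 x h2
          omega
      rw [if_pos hd, ih y hs']
      constructor
      · rintro ⟨hnd, hlast⟩
        refine ⟨List.nodup_cons.mpr ⟨hxnot, hnd⟩, ?_⟩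
        rw [hlast]; push_cast [List.length_cons]; omega
      · rintro ⟨hnd, hlast⟩
        refine ⟨(List.nodup_cons.mp hnd).2, ?_⟩
        rw [hlast]; push_cast [List.length_cons]; omega
    · rw [if_neg hd]
      simp only [Bool.false_eq_true, false_iff]
      rintro ⟨hnd, hlast⟩
      -- y = x (not nodup) or y ≥ x + 2 (last element too large)
      rcases lt_or_eq_of_le hxy with hlt | heq
      · have h2 : x + 2 ≤ y := by omega
        have hlt' : (y :: r).Pairwise (· < ·) := by
          have hne : (y :: r).Pairwise (· ≠ ·) := (List.nodup_cons.mp hnd).2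
          exact (hs'.and hne).imp (fun h => lt_of_le_of_ne h.1 h.2)
        have := last_ge_of_sorted_lt y r hlt'
        rw [hlast] at this
        simp only [List.length_cons] at this
        push_cast at this
        omega
      · exact (List.nodup_cons.mp hnd).1 (heq ▸ List.mem_cons_self)

-- distinct count equals length iff no duplicates
theorem length_ofList_eq_iff (xs : List Int) :
    (PySem.Set.ofList xs).length = xs.length ↔ xs.Nodup := by
  induction xs with
  | nil => simp
  | cons x xs ih =>
    rw [PySem.Set.ofList_cons]
    by_cases hx : x ∈ xs
    · have hx' : x ∈ PySem.Set.ofList xs := (PySem.Set.mem_ofList xs x).mpr hx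
      have hlt : ((PySem.Set.ofList xs).discard x).length < (PySem.Set.ofList xs).length := by
        simp only [PySem.Set.discard]
        exact List.length_filter_lt_length_iff_exists.mpr ⟨x, hx', by simp⟩
      have hle := PySem.Set.length_ofList_le xs
      constructor
      · intro h; simp only [List.length_cons] at h; omega
      · intro h; exact absurd hx (List.nodup_cons.mp h).1
    · have heq : (PySem.Set.ofList xs).discard x = PySem.Set.ofList xs := by
        simp only [PySem.Set.discard]
        apply List.filter_eq_self.mpr
        intro a ha
        have : a ∈ xs := (PySem.Set.mem_ofList xs a).mp ha
        simp only [Bool.not_eq_true', beq_eq_false_iff_ne, ne_eq]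
        rintro rfl; exact hx this
      rw [heq]
      simp only [List.length_cons, List.nodup_cons]
      constructor
      · intro h; exact ⟨hx, ih.mp (by omega)⟩
      · rintro ⟨-, hnd⟩; rw [ih.mpr hnd]

-- every member of a ≤-sorted nonempty list is at most its last element
theorem mem_le_last_of_sorted (l : List Int) (hl : l ≠ [])
    (hs : l.Pairwise (· ≤ ·)) : ∀ a ∈ l, a ≤ l.getLast hl := by
  induction l with
  | nil => simp at hl
  | cons x t ih =>
    intro a ha
    cases t with
    | nil => simp at ha; simp [ha]
    | cons y r =>
      rw [List.getLast_cons (by simp)]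
      have ihy := ih (by simp) (List.Pairwise.of_cons hs)
      rcases List.mem_cons.mp ha with rfl | hmem
      · have hxy : a ≤ y := (List.pairwise_cons.mp hs).1 y (by simp)
        exact le_trans hxy (ihy y (by simp))
      · exact ihy a hmem

-- ===== VERDICT (by name: the statement is the Claim_ definition above) =====
theorem consecutive_combo_spec : Claim_equal_consecutive_combo := by
  intro lst1 lst2 _
  unfold Spec_consecutive_combo consecutive_combo consecutive_combo_alt
  set xs := lst1 ++ lst2 with hxs
  set L := PySem.List.sorted xs (fun x => x) false with hL
  have hperm : L.Perm xs := PySem.List.sorted_perm xs (fun x => x) false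
  have hlen : L.length = xs.length := hperm.length_eq
  have hsorted : L.Pairwise (· ≤ ·) := PySem.List.sorted_pairwise xs (fun x => x)
  by_cases hn : xs.length < 2
  · rw [if_pos hn]
    match hLc : L, hlen with
    | [], _ => simp [pvLoopA]
    | [x], _ => simp [pvLoopA]
    | x :: y :: r, hlen2 => simp only [List.length_cons] at hlen2; omega
  · rw [if_neg hn]
    match hLc : L, hlen, hsorted with
    | [], hlen2, _ => simp only [List.length_nil] at hlen2; omega
    | [x], hlen2, _ => simp only [List.length_cons, List.length_nil] at hlen2; omega
    | x :: y :: r, hlen2, hsorted2 =>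
      have hLne : (x :: y :: r) ≠ ([] : List Int) := by simp
      have hperm2 : (x :: y :: r).Perm xs := hLc ▸ hperm
      -- the set is nonempty, so max?/min? return values
      have hsne : PySem.Set.ofList xs ≠ [] := by
        intro h
        have : x ∈ PySem.Set.ofList xs :=
          (PySem.Set.mem_ofList xs x).mpr (hperm2.mem_iff.mp (by simp))
        rw [h] at this
        simp at this
      obtain ⟨hi, hhi⟩ : ∃ hi, PySem.List.max? (PySem.Set.ofList xs) (fun x => x) = some hi := by
        cases hmx : PySem.List.max? (PySem.Set.ofList xs) (fun x => x) with
        | none => exact absurd ((PySem.List.max?_eq_none_iff _ _).mp hmx) hsne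
        | some v => exact ⟨v, rfl⟩
      obtain ⟨lo, hlo⟩ : ∃ lo, PySem.List.min? (PySem.Set.ofList xs) (fun x => x) = some lo := by
        cases hmn : PySem.List.min? (PySem.Set.ofList xs) (fun x => x) with
        | none => exact absurd ((PySem.List.min?_eq_none_iff _ _).mp hmn) hsne
        | some v => exact ⟨v, rfl⟩
      rw [hhi, hlo]
      -- lo is the head x, hi is the last element
      have hmemS : ∀ a, a ∈ PySem.Set.ofList xs ↔ a ∈ x :: y :: r := by
        intro a; rw [PySem.Set.mem_ofList, hperm2.mem_iff]
      have hloL : lo ∈ x :: y :: r := (hmemS lo).mp (PySem.List.min?_mem hlo)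
      have hhiL : hi ∈ x :: y :: r := (hmemS hi).mp (PySem.List.max?_mem hhi)
      have hxmin : ∀ a ∈ x :: y :: r, x ≤ a := by
        intro a ha
        exact PySem.List.key_head_sorted_le xs (fun x => x) hLc a (hperm2.mem_iff.mp ha)
      have hloeq : lo = x := le_antisymm
        (PySem.List.min?_isMin hlo x ((hmemS x).mpr (by simp)))
        (hxmin lo hloL)
      have hlast : hi = (x :: y :: r).getLast hLne := le_antisymm
        (mem_le_last_of_sorted _ hLne hsorted2 hi hhiL)
        (PySem.List.max?_isMax hhi _ ((hmemS _).mpr (List.getLast_mem hLne)))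
      -- number of distinct elements vs n
      have hnodupL : (PySem.Set.ofList xs).length = xs.length ↔ (x :: y :: r).Nodup := by
        rw [length_ofList_eq_iff, hperm2.nodup_iff]
      have hflag : pvLoopA false (x :: y :: r) = pvLoopA true (x :: y :: r) := by
        rw [pvLoopA_cons2, pvLoopA_cons2]
      simp only [List.length_cons] at hlen2
      show pvLoopA false (x :: y :: r) =
        ((PySem.Set.len (PySem.Set.ofList xs) == (xs.length : Int)) && (hi - lo == (xs.length : Int) - 1))
      rw [hflag]
      rcases Bool.eq_false_or_eq_true ((PySem.Set.len (PySem.Set.ofList xs) == (xs.length : Int)) && (hi - lo == (xs.length : Int) - 1)) with hB | hB <;> rw [hB]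
      · simp only [Bool.and_eq_true, beq_iff_eq, PySem.Set.len] at hB
        apply (pvLoopA_true_iff x (y :: r) hsorted2).mpr
        obtain ⟨hB1, hB2⟩ := hB
        refine ⟨hnodupL.mp (by exact_mod_cast hB1), ?_⟩
        rw [hlast, hloeq] at hB2
        push_cast [List.length_cons] at hB2 ⊢
        omega
      · simp only [Bool.and_eq_false_iff, beq_eq_false_iff_ne, ne_eq, PySem.Set.len] at hB
        rw [Bool.eq_false_iff, ne_eq]
        intro hT
        obtain ⟨hnd, hlst⟩ := (pvLoopA_true_iff x (y :: r) hsorted2).mp hT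
        rcases hB with hB | hB
        · exact hB (by exact_mod_cast hnodupL.mpr hnd)
        · apply hB
          rw [hlast.symm] at hlst
          rw [hloeq, hlst]
          push_cast [List.length_cons]
          omega
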